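-- pv_equiv track=rewrite | github.com/jtonk/ha_rws_tide | custom_components/rws_tide/config_flow.py | _resolve_location_value
-- ===== SOURCE A (Python) =====
-- def _resolve_location_value(value: str, location_options: dict[str, str]) -> str | None:
--     """Resolve either a location code or a label to the canonical location code."""
--     normalized = value.strip().lower()
--     if normalized in {code.lower() for code in location_options}:
--         for code in location_options:
--             if code.lower() == normalized:
--                 return code
--     for code, label in location_options.items():
--         if label.lower() == normalized:
--             return code
--     return None
-- ===== SOURCE B (Python) =====
-- def _resolve_location_value(value: str, location_options: dict[str, str]) -> str | None:
--     """Resolve either a location code or a label to the canonical location code."""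
--     normalized = value.strip().lower()
--     code_index: dict[str, str] = {}
--     label_index: dict[str, str] = {}
--     for code, label in location_options.items():
--         code_index.setdefault(code.lower(), code)
--         label_index.setdefault(label.lower(), code)
--     if normalized in code_index:
--         return code_index[normalized]
--     return label_index.get(normalized)
-- ===== Notes on version B (the rewrite author's own statement) =====
-- stated objective: idiomatic
-- what changed: B builds two first-wins lowercase dict indexes (code->code and label->code) in a single pass over the items and answers by two hash lookups, instead of A's set-comprehension membership test followed by two linear rescans of the dict.
import Mathlib
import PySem

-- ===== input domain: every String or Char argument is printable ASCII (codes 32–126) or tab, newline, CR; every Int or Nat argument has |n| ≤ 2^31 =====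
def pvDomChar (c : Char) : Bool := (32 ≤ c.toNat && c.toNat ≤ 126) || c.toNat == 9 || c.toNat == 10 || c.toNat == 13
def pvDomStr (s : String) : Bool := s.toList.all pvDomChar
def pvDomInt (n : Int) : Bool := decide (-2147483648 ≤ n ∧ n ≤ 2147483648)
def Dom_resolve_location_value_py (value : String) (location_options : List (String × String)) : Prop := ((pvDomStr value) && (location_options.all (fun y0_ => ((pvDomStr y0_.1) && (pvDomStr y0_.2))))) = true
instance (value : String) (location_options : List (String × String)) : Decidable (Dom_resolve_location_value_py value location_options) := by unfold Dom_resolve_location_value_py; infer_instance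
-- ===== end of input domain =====

-- B replaces A's set-membership test plus two linear rescans of the dict by one pass that
-- builds two first-wins lowercase indexes (code->code, label->code) and two dict lookups (idiomatic).

-- ===== PORT A =====
def resolve_location_value_py (value : String) (location_options : List (String × String)) : Option String :=
  let normalized := PySem.Str.lower (PySem.Str.strip value)
  -- 'if normalized in {code.lower() for code in location_options}: for code …: if code.lower() == normalized: return code'
  let fromCode : Option String :=
    if normalized ∈ PySem.Set.ofList (location_options.map (fun p => PySem.Str.lower p.1)) then
      (location_options.find? (fun p => PySem.Str.lower p.1 == normalized)).map (·.1)
    else none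
  match fromCode with
  | some c => some c
  | none =>
      -- 'for code, label in location_options.items(): if label.lower() == normalized: return code'
      (location_options.find? (fun p => PySem.Str.lower p.2 == normalized)).map (·.1)

-- ===== PORT B =====
def resolve_location_value_py_alt (value : String) (location_options : List (String × String)) : Option String :=
  let normalized := PySem.Str.lower (PySem.Str.strip value)
  -- one loop: code_index.setdefault(code.lower(), code); label_index.setdefault(label.lower(), code)
  let idx : PySem.Dict String String × PySem.Dict String String :=
    location_options.foldl
      (fun d kv =>
        (d.1.setdefault (PySem.Str.lower kv.1) kv.1, d.2.setdefault (PySem.Str.lower kv.2) kv.1))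
      (PySem.Dict.empty, PySem.Dict.empty)
  match idx.1.get? normalized with
  | some c => some c            -- 'if normalized in code_index: return code_index[normalized]'
  | none => idx.2.get? normalized  -- 'return label_index.get(normalized)'

-- ===== PRECONDITION & SPEC =====
def Spec_resolve_location_value_py (value : String) (location_options : List (String × String)) (out : Option String) : Prop := out = resolve_location_value_py_alt value location_options
instance (value : String) (location_options : List (String × String)) (out : Option String) : Decidable (Spec_resolve_location_value_py value location_options out) := by unfold Spec_resolve_location_value_py; infer_instance

-- ===== CLAIM (what is proved, stated in full; the proofs are below) =====
def Claim_equal_resolve_location_value_py : Prop := ∀ (value : String) (location_options : List (String × String)), Dom_resolve_location_value_py value location_options → Spec_resolve_location_value_py value location_options (resolve_location_value_py value location_options)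

-- ===== LEMMAS AND PROOFS =====

-- The first component of B's fold is a first-wins index: looking up x gives the first
-- pair whose lowered code is x (after anything already in d1).
theorem fold_fst_get? (l : List (String × String)) (d1 d2 : PySem.Dict String String) (x : String) :
    ((l.foldl
        (fun (d : PySem.Dict String String × PySem.Dict String String) kv =>
          (d.1.setdefault (PySem.Str.lower kv.1) kv.1, d.2.setdefault (PySem.Str.lower kv.2) kv.1))
        (d1, d2)).1).get? x
      = (d1.get? x).or ((l.find? (fun p => PySem.Str.lower p.1 == x)).map (·.1)) := by
  induction l generalizing d1 d2 with
  | nil => simp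
  | cons kv t ih =>
      simp only [List.foldl_cons, List.find?_cons]
      rw [ih]
      by_cases h : PySem.Str.lower kv.1 = x
      · subst h
        simp [PySem.Dict.get?_setdefault_self]
      · rw [PySem.Dict.get?_setdefault_of_ne (hne := Ne.symm h)]
        have hb : (PySem.Str.lower kv.1 == x) = false := by simp [h]
        rw [hb]

-- Same for the label index: first pair whose lowered label is x, mapped to its code.
theorem fold_snd_get? (l : List (String × String)) (d1 d2 : PySem.Dict String String) (x : String) :
    ((l.foldl
        (fun (d : PySem.Dict String String × PySem.Dict String String) kv =>
          (d.1.setdefault (PySem.Str.lower kv.1) kv.1, d.2.setdefault (PySem.Str.lower kv.2) kv.1))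
        (d1, d2)).2).get? x
      = (d2.get? x).or ((l.find? (fun p => PySem.Str.lower p.2 == x)).map (·.1)) := by
  induction l generalizing d1 d2 with
  | nil => simp
  | cons kv t ih =>
      simp only [List.foldl_cons, List.find?_cons]
      rw [ih]
      by_cases h : PySem.Str.lower kv.2 = x
      · subst h
        simp [PySem.Dict.get?_setdefault_self]
      · rw [PySem.Dict.get?_setdefault_of_ne (hne := Ne.symm h)]
        have hb : (PySem.Str.lower kv.2 == x) = false := by simp [h]
        rw [hb]

-- A's set-membership test agrees with whether the code scan finds something.
theorem mem_lowered_iff_find?_isSome (l : List (String × String)) (x : String) :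
    x ∈ PySem.Set.ofList (l.map (fun p => PySem.Str.lower p.1))
      ↔ (l.find? (fun p => PySem.Str.lower p.1 == x)).isSome := by
  rw [PySem.Set.mem_ofList, List.find?_isSome, List.mem_map]
  constructor
  · rintro ⟨p, hp, he⟩; exact ⟨p, hp, by simp [he]⟩
  · rintro ⟨p, hp, he⟩; exact ⟨p, hp, by simpa using he⟩

-- ===== VERDICT (by name: the statement is the Claim_ definition above) =====
theorem resolve_location_value_py_spec : Claim_equal_resolve_location_value_py := by
  intro value location_options _
  unfold Spec_resolve_location_value_py resolve_location_value_py resolve_location_value_py_alt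
  simp only [fold_fst_get?, fold_snd_get?, PySem.Dict.get?_empty, Option.none_or]
  set x := PySem.Str.lower (PySem.Str.strip value) with hx
  by_cases hmem : x ∈ PySem.Set.ofList (location_options.map (fun p => PySem.Str.lower p.1))
  · simp [hmem]
  · have hnone : (location_options.find? (fun p => PySem.Str.lower p.1 == x)) = none := by
      have := (mem_lowered_iff_find?_isSome location_options x).not.mp hmem
      cases h : location_options.find? (fun p => PySem.Str.lower p.1 == x)
      · rfl
      · exact absurd (by simp [h]) this
    simp [hmem, hnone]
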